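-- pv_equiv track=rewrite | github.com/ckchengucsd/SO3-Cell | Framework/src/ilp_pnr_function.py | find_common_nets_in_order
-- ===== SOURCE A (Python) =====
-- def find_common_nets_in_order(net_flows):
--     if not net_flows:
--         return []
--
--     set_flows = [set(flow) for flow in net_flows]
--     common_nets = set_flows[0].intersection(*set_flows[1:])
--     reference_flow = net_flows[0]
--     common_in_order = [net for net in reference_flow if net in common_nets]
--     return common_in_order
-- ===== SOURCE B (Python) =====
-- def find_common_nets_in_order(net_flows):
--     if not net_flows:
--         return []
--     common = list(net_flows[0])
--     for flow in net_flows[1:]: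
--         members = set(flow)
--         common = [net for net in common if net in members]
--     return common
-- ===== Notes on version B (the rewrite author's own statement) =====
-- stated objective: alternative
-- what changed: Replaces the bulk intersection of all per-flow sets followed by one filtering pass with an incremental left fold: the reference flow is repeatedly filtered by each subsequent flow's membership set.
import Mathlib
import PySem

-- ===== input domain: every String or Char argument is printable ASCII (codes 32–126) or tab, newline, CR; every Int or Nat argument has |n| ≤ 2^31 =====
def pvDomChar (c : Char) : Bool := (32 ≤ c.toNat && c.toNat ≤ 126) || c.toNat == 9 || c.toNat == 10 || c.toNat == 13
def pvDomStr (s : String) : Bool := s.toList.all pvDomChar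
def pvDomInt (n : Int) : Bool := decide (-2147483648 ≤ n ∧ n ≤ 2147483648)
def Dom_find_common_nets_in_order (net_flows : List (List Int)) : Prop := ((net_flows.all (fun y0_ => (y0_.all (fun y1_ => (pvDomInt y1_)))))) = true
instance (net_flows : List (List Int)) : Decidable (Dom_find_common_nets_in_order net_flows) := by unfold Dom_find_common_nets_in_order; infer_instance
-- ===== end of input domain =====

-- B replaces A's bulk intersection of all per-flow sets + one filter pass with an
-- incremental fold that repeatedly filters the reference flow by each later flow's set
-- (alternative decomposition, same result; return value only, no mutation involved).

-- ===== PORT A =====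
def find_common_nets_in_order (net_flows : List (List Int)) : List Int :=
  if net_flows = [] then []
  else
    let set_flows : List (PySem.Set Int) := net_flows.map (fun flow => PySem.Set.ofList flow)
    let common_nets : PySem.Set Int :=
      (set_flows.drop 1).foldl (fun s t => PySem.Set.inter s t) (set_flows.headD [])
    let reference_flow := net_flows.headD []
    reference_flow.filter (fun net => PySem.Set.contains common_nets net)

-- ===== PORT B =====
def find_common_nets_in_order_alt : List (List Int) → List Int
  | [] => []
  | first :: rest =>
    rest.foldl
      (fun common flow =>
        let members : PySem.Set Int := PySem.Set.ofList flow
        common.filter (fun net => PySem.Set.contains members net))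
      first

-- ===== PRECONDITION & SPEC =====
def Spec_find_common_nets_in_order (net_flows : List (List Int)) (out : List Int) : Prop := out = find_common_nets_in_order_alt net_flows
instance (net_flows : List (List Int)) (out : List Int) : Decidable (Spec_find_common_nets_in_order net_flows out) := by unfold Spec_find_common_nets_in_order; infer_instance

-- ===== CLAIM (what is proved, stated in full; the proofs are below) =====
def Claim_equal_find_common_nets_in_order : Prop := ∀ (net_flows : List (List Int)), Dom_find_common_nets_in_order net_flows → Spec_find_common_nets_in_order net_flows (find_common_nets_in_order net_flows)

-- ===== LEMMAS AND PROOFS =====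

-- Filtering by the fold of intersections at once = folding the filters one set at a time.
theorem filter_foldl_inter (rest : List (List Int)) :
    ∀ (acc : List Int) (s : PySem.Set Int),
      acc.filter (fun x =>
        PySem.Set.contains ((rest.map (fun f => PySem.Set.ofList f)).foldl (fun a t => PySem.Set.inter a t) s) x)
      = rest.foldl
          (fun common flow => common.filter (fun net => PySem.Set.contains (PySem.Set.ofList flow) net))
          (acc.filter (fun x => PySem.Set.contains s x)) := by
  induction rest with
  | nil => intro acc s; simp
  | cons f t ih =>
    intro acc s
    simp only [List.map_cons, List.foldl_cons]
    rw [ih]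
    congr 1
    rw [List.filter_filter]
    apply List.filter_congr
    intro x _
    simp [PySem.Set.mem_inter, Bool.and_comm]

theorem find_common_nets_in_order_eq (net_flows : List (List Int)) :
    find_common_nets_in_order net_flows = find_common_nets_in_order_alt net_flows := by
  cases net_flows with
  | nil => rfl
  | cons first rest =>
    simp only [find_common_nets_in_order, find_common_nets_in_order_alt, if_neg (List.cons_ne_nil first rest),
      List.map_cons, List.drop_succ_cons, List.drop_zero, List.headD_cons]
    rw [filter_foldl_inter]
    congr 1
    apply (List.filter_eq_self).2
    intro x hx
    simpa [PySem.Set.contains_iff, PySem.Set.mem_ofList] using hx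

-- ===== VERDICT (by name: the statement is the Claim_ definition above) =====
theorem find_common_nets_in_order_spec : Claim_equal_find_common_nets_in_order := by
  intro net_flows _
  exact find_common_nets_in_order_eq net_flows
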